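-- pv_equiv track=rewrite | github.com/carryons6/fitson | app/header_parser.py | _split_value_and_comment
-- ===== SOURCE A (Python) =====
-- def _split_value_and_comment(text: str) -> tuple[str, str]:
--     in_string = False
--     index = 0
--     while index < len(text):
--         char = text[index]
--         if char == "'":
--             if in_string and index + 1 < len(text) and text[index + 1] == "'":
--                 index += 2
--                 continue
--             in_string = not in_string
--         elif char == "/" and not in_string:
--             return text[:index].strip(), text[index + 1:].strip()
--         index += 1
--     return text.strip(), ""
-- ===== SOURCE B (Python) =====
-- def _split_value_and_comment(text: str) -> tuple[str, str]:
--     # Jumping parser: find the next "/" and next "'" from pos; a "/" that comes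
--     # first splits the line; otherwise a quoted string is consumed as one token.
--     pos = 0
--     n = len(text)
--     while pos < n:
--         s = text.find("/", pos)
--         q = text.find("'", pos)
--         if s != -1 and (q == -1 or s < q):
--             return text[:s].strip(), text[s + 1:].strip()
--         if q == -1:
--             break
--         pos = q + 1
--         while pos < n:  # consume the quoted string (doubled quote = escaped quote)
--             if text[pos] != "'":
--                 pos += 1
--             elif pos + 1 < n and text[pos + 1] == "'":
--                 pos += 2
--             else:
--                 pos += 1
--                 break
--     return text.strip(), ""
-- ===== Notes on version B (the rewrite author's own statement) =====
-- stated objective: faster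
-- what changed: Replaces A's per-character scan with an in_string boolean by a find-based jumping parser: it locates the next slash and next quote from the current position, splits immediately when the slash comes first, and otherwise consumes the whole quoted token (with doubled-quote escapes) as a unit.
import Mathlib
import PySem

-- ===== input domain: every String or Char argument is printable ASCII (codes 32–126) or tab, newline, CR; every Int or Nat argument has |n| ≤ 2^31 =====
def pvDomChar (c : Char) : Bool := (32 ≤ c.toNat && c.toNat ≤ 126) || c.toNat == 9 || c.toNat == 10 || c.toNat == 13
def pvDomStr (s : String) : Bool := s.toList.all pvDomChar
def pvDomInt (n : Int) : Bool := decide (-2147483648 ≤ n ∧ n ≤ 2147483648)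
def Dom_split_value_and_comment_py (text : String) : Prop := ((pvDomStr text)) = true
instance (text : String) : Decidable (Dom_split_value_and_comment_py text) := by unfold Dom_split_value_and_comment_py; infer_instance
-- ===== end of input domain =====

-- B replaces A's per-character in_string toggle with a find-based jumping parser
-- that consumes quoted strings as whole tokens (objective: faster, measured — C-level find jumps instead of a per-char Python loop).


-- ===== PORT A =====
-- A's while-loop over index, with the in_string flag; `rem` is the not-yet-scanned
-- suffix text[idx:] (text[index] / the text[index+1] peek are its head / second element).
-- Python's nonnegative slices text[:idx].strip() / text[idx+1:].strip() are ported as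
-- take/drop (exact for the nonnegative in-range indices used here).
def pvALoop (full rem : List Char) (idx : Nat) (instr : Bool) : String × String :=
  match rem with
  | [] => (String.ofList (PySem.Chars.strip full), "")
  | c :: rest =>
    if c = '\'' then
      match rest with
      | c2 :: rest2 =>
        if instr && (c2 = '\'') then pvALoop full rest2 (idx + 2) instr
        else pvALoop full (c2 :: rest2) (idx + 1) (!instr)
      | [] => pvALoop full [] (idx + 1) (!instr)
    else if c = '/' && !instr then
      (String.ofList (PySem.Chars.strip (full.take idx)),
       String.ofList (PySem.Chars.strip (full.drop (idx + 1))))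
    else pvALoop full rest (idx + 1) instr

def split_value_and_comment_py (text : String) : String × String :=
  pvALoop text.toList text.toList 0 false

-- ===== PORT B =====
-- Source B's inner while-loop: consume one quoted string starting at text[pos:] = rem,
-- returning the updated pos and the remaining suffix.
def pvBSkip (rem : List Char) (pos : Nat) : Nat × List Char :=
  match rem with
  | [] => (pos, [])
  | c :: rest =>
    if c ≠ '\'' then pvBSkip rest (pos + 1)
    else
      match rest with
      | c2 :: rest2 => if c2 = '\'' then pvBSkip rest2 (pos + 2) else (pos + 1, rest)
      | [] => (pos + 1, [])

theorem pvBSkip_snd_len (rem : List Char) (pos : Nat) : (pvBSkip rem pos).2.length ≤ rem.length := by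
  fun_induction pvBSkip rem pos <;> simp_all <;> omega

-- Source B's outer while-loop; rem = text[pos:].  Python's text.find(ch, pos) is ported as
-- the pos-relative first occurrence in the suffix (found at relative i ⇒ absolute pos+i;
-- Option none = Python's -1); exact by find's definition.  The four match arms are the
-- `if s != -1 and (q == -1 or s < q)` / `if q == -1: break` chain.
def pvBOuter (full rem : List Char) (pos : Nat) : String × String :=
  match rem with
  | [] => (String.ofList (PySem.Chars.strip full), "")
  | c :: rest =>
    match List.idxOf? '/' (c :: rest), List.idxOf? '\'' (c :: rest) with
    | some i, none =>
      (String.ofList (PySem.Chars.strip (full.take (pos + i))),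
       String.ofList (PySem.Chars.strip (full.drop (pos + i + 1))))
    | some i, some j =>
      if i < j then
        (String.ofList (PySem.Chars.strip (full.take (pos + i))),
         String.ofList (PySem.Chars.strip (full.drop (pos + i + 1))))
      else
        let pr := pvBSkip ((c :: rest).drop (j + 1)) (pos + j + 1)
        pvBOuter full pr.2 pr.1
    | none, some j =>
      let pr := pvBSkip ((c :: rest).drop (j + 1)) (pos + j + 1)
      pvBOuter full pr.2 pr.1
    | none, none => (String.ofList (PySem.Chars.strip full), "")
  termination_by rem.length
  decreasing_by
  all_goals
    refine lt_of_le_of_lt (pvBSkip_snd_len _ _) ?_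
    simp


def split_value_and_comment_py_alt (text : String) : String × String :=
  pvBOuter text.toList text.toList 0

-- ===== PRECONDITION & SPEC =====
def Spec_split_value_and_comment_py (text : String) (out : String × String) : Prop := out = split_value_and_comment_py_alt text
instance (text : String) (out : String × String) : Decidable (Spec_split_value_and_comment_py text out) := by unfold Spec_split_value_and_comment_py; infer_instance

-- ===== CLAIM (what is proved, stated in full; the proofs are below) =====
def Claim_equal_split_value_and_comment_py : Prop := ∀ (text : String), Dom_split_value_and_comment_py text → Spec_split_value_and_comment_py text (split_value_and_comment_py text)

-- ===== LEMMAS AND PROOFS =====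

-- Scanning in string state = consuming the quoted string as a unit, then scanning on.
theorem pvInString (full rem : List Char) (pos : Nat) :
    pvALoop full rem pos true
      = pvALoop full (pvBSkip rem pos).2 (pvBSkip rem pos).1 false := by
  fun_induction pvBSkip rem pos <;> try simp_all [pvALoop]
  next c rest hc ih =>
    rcases rest with _ | ⟨c2, rest2⟩ <;> simp_all [pvALoop]

theorem pvMain (full : List Char) :
    ∀ n rem pos, rem.length ≤ n →
      pvALoop full rem pos false = pvBOuter full rem pos := by
  intro n
  induction n with
  | zero =>
    intro rem pos h
    cases rem with
    | nil => simp [pvALoop, pvBOuter]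
    | cons c rest => simp at h
  | succ n ih =>
    intro rem pos h
    cases rem with
    | nil => simp [pvALoop, pvBOuter]
    | cons c rest =>
      by_cases hq : c = '\''
      · subst hq
        have hL : pvALoop full ('\'' :: rest) pos false
            = pvALoop full rest (pos + 1) true := by
          cases rest <;> simp [pvALoop]
        have hSkipLen : (pvBSkip rest (pos + 1)).2.length ≤ n := by
          have := pvBSkip_snd_len rest (pos + 1)
          simp at h; omega
        rw [hL, pvInString, ih _ _ hSkipLen]
        rcases hi : List.idxOf? '/' rest with _ | i <;>
          simp [pvBOuter, List.idxOf?_cons, hi]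
      · by_cases hs : c = '/'
        · subst hs
          have hL : pvALoop full ('/' :: rest) pos false
              = (String.ofList (PySem.Chars.strip (List.take pos full)),
                 String.ofList (PySem.Chars.strip (List.drop (pos + 1) full))) := by
            cases rest <;> simp [pvALoop]
          rw [hL]
          rcases hj : List.idxOf? '\'' rest with _ | j <;>
            simp [pvBOuter, List.idxOf?_cons, hj]
        · -- head is neither a quote nor a slash
          have hrest : rest.length ≤ n := by simp at h; omega
          have hL : pvALoop full (c :: rest) pos false
              = pvALoop full rest (pos + 1) false := by
            cases rest <;> simp [pvALoop, hq, hs]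
          rw [hL, ih _ _ hrest]
          cases rest with
          | nil => simp [pvBOuter, List.idxOf?_cons, hq, hs]
          | cons d r' =>
            rcases h1 : List.idxOf? '/' (d :: r') with _ | i <;>
              rcases h2 : List.idxOf? '\'' (d :: r') with _ | j <;>
              simp only [pvBOuter, List.idxOf?_cons, beq_iff_eq,
                if_neg hq, if_neg hs, h1, h2, Option.map_some, Option.map_none,
                List.drop_succ_cons, Nat.add_lt_add_iff_right]
            · simp [Nat.add_comm, Nat.add_left_comm]
            · simp [Nat.add_comm, Nat.add_left_comm]
            · by_cases hij : i < j <;>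
                simp [hij, Nat.add_comm, Nat.add_left_comm]

-- ===== VERDICT (by name: the statement is the Claim_ definition above) =====
theorem split_value_and_comment_py_spec : Claim_equal_split_value_and_comment_py := by
  intro text _
  unfold Spec_split_value_and_comment_py split_value_and_comment_py split_value_and_comment_py_alt
  exact pvMain _ _ _ 0 (le_refl _)
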